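-- pv_equiv track=rewrite | github.com/thomas-westfall/assignments-12700 | finalcode/b.py | bounding_rect
-- ===== SOURCE A (Python) =====
-- def bounding_rect(data):
--   ans = []
--   temp = []
--   minx = 0
--   miny = 0
--   maxx = 0
--   maxy = 0
--
--   for x in data:
--       if x[0] + x[2] > maxx:
--           maxx = x[0] + x[2]
--       if x[0] - x[2] < minx:
--           minx = x[0] - x[2]
--       if x[1] + x[2] > maxy:
--           maxy = x[1] + x[2]
--       if x[1] - x[2] < miny:
--           miny = x[1] - x[2]
--
--   temp.append(minx)
--   temp.append(miny)
--   ans.append(temp)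
--   temp = []
--   temp.append(maxx)
--   temp.append(maxy)
--   ans.append(temp)
--   temp = []
--   temp.append(maxx)
--   temp.append(miny)
--   ans.append(temp)
--   temp = []
--   temp.append(minx)
--   temp.append(maxy)
--   ans.append(temp)
--   return ans
-- ===== SOURCE B (Python) =====
-- def bounding_rect(data):
--     # Divide and conquer: recursively split the circle list in half, compute the
--     # bounding box of each half, and merge; finally clamp the box to include the origin.
--     def bbox(circles):
--         if len(circles) == 1:
--             x = circles[0][0]
--             y = circles[0][1]
--             r = circles[0][2]
--             return (x - r, y - r, x + r, y + r)
--         mid = len(circles) // 2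
--         a = bbox(circles[:mid])
--         b = bbox(circles[mid:])
--         return (min(a[0], b[0]), min(a[1], b[1]), max(a[2], b[2]), max(a[3], b[3]))
--
--     if data:
--         b = bbox(data)
--         minx = min(b[0], 0)
--         miny = min(b[1], 0)
--         maxx = max(b[2], 0)
--         maxy = max(b[3], 0)
--     else:
--         minx = miny = maxx = maxy = 0
--     return [[minx, miny], [maxx, maxy], [maxx, miny], [minx, maxy]]
-- ===== Notes on version B (the rewrite author's own statement) =====
-- stated objective: alternative
-- what changed: Replaces A's single linear scan with mutable running extrema by a divide-and-conquer recursion that splits the circle list in half, computes the bounding box of each half, merges the two boxes componentwise, and finally clamps the box to include the origin.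
import Mathlib
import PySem

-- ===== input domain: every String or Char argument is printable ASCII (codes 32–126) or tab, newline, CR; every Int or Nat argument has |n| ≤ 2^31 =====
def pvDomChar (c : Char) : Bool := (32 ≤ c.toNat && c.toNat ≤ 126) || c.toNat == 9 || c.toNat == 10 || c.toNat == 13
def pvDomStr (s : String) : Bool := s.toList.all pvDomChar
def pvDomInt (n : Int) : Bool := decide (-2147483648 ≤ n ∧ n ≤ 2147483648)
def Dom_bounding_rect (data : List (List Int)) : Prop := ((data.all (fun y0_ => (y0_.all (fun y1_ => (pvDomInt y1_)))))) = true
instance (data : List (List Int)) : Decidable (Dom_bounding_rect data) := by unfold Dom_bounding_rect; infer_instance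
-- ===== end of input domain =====

-- ===== PORT A =====
-- A scans data once, updating the four extrema (seeded at 0) in place; rows must
-- have at least 3 entries.  x[0]/x[1]/x[2] are in range under Pre_, so getD is exact.
def bounding_rect (data : List (List Int)) : List (List Int) :=
  let st := data.foldl
    (fun (s : Int × Int × Int × Int) (x : List Int) =>
      let minx := s.1; let miny := s.2.1; let maxx := s.2.2.1; let maxy := s.2.2.2
      let maxx := if x.getD 0 0 + x.getD 2 0 > maxx then x.getD 0 0 + x.getD 2 0 else maxx
      let minx := if x.getD 0 0 - x.getD 2 0 < minx then x.getD 0 0 - x.getD 2 0 else minx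
      let maxy := if x.getD 1 0 + x.getD 2 0 > maxy then x.getD 1 0 + x.getD 2 0 else maxy
      let miny := if x.getD 1 0 - x.getD 2 0 < miny then x.getD 1 0 - x.getD 2 0 else miny
      (minx, miny, maxx, maxy))
    (0, 0, 0, 0)
  [[st.1, st.2.1], [st.2.2.1, st.2.2.2], [st.2.2.1, st.2.1], [st.1, st.2.2.2]]

-- ===== PORT B =====
-- B is divide and conquer: split the list in half, compute each half's bounding
-- box recursively, merge componentwise, then clamp the box to include the origin.
def pvBox (x : List Int) : Int × Int × Int × Int :=
  (x.getD 0 0 - x.getD 2 0, x.getD 1 0 - x.getD 2 0, x.getD 0 0 + x.getD 2 0, x.getD 1 0 + x.getD 2 0)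

def pvMerge (a b : Int × Int × Int × Int) : Int × Int × Int × Int :=
  (min a.1 b.1, min a.2.1 b.2.1, max a.2.2.1 b.2.2.1, max a.2.2.2 b.2.2.2)

-- bbox: Python's recursive helper; never called on [] (the [] arm is unreachable).
def pvBbox (l : List (List Int)) : Int × Int × Int × Int :=
  match l with
  | [] => (0, 0, 0, 0)
  | [x] => pvBox x
  | x :: y :: rest =>
      pvMerge (pvBbox ((x :: y :: rest).take ((x :: y :: rest).length / 2)))
              (pvBbox ((x :: y :: rest).drop ((x :: y :: rest).length / 2)))
termination_by l.length
decreasing_by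
  · simp [List.length_take]; omega
  · simp; omega

def bounding_rect_alt (data : List (List Int)) : List (List Int) :=
  match data with
  | [] => [[0, 0], [0, 0], [0, 0], [0, 0]]
  | _ :: _ =>
      let b := pvBbox data
      let minx := min b.1 0
      let miny := min b.2.1 0
      let maxx := max b.2.2.1 0
      let maxy := max b.2.2.2 0
      [[minx, miny], [maxx, maxy], [maxx, miny], [minx, maxy]]

-- ===== PRECONDITION & SPEC =====
-- Pre_ excludes rows shorter than 3, on which A (and B) raise IndexError.
def Pre_bounding_rect (data : List (List Int)) : Prop :=
  ∀ x ∈ data, 3 ≤ x.length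
instance (data : List (List Int)) : Decidable (Pre_bounding_rect data) := by
  unfold Pre_bounding_rect; infer_instance
def pvWitness_bounding_rect : List (List Int) := [[1, 2, 3], [-4, 0, 2]]

def Spec_bounding_rect (data : List (List Int)) (out : List (List Int)) : Prop := out = bounding_rect_alt data
instance (data : List (List Int)) (out : List (List Int)) : Decidable (Spec_bounding_rect data out) := by unfold Spec_bounding_rect; infer_instance

-- ===== CLAIM (what is proved, stated in full; the proofs are below) =====
def Claim_equal_bounding_rect : Prop := ∀ (data : List (List Int)), Dom_bounding_rect data → Pre_bounding_rect data → Spec_bounding_rect data (bounding_rect data)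

-- ===== LEMMAS AND PROOFS =====

theorem pvMerge_assoc (a b c : Int × Int × Int × Int) :
    pvMerge (pvMerge a b) c = pvMerge a (pvMerge b c) := by
  simp [pvMerge, min_assoc, max_assoc]

-- The tree-shaped merge of a nonempty list equals a left fold of pvMerge, for any seed.
theorem pvBbox_foldl : ∀ (n : ℕ) (l : List (List Int)), l.length = n → l ≠ [] →
    ∀ z, pvMerge z (pvBbox l) = l.foldl (fun s x => pvMerge s (pvBox x)) z := by
  intro n
  induction n using Nat.strong_induction_on with
  | _ n ih =>
    intro l hn hne z
    match l with
    | [] => exact absurd rfl hne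
    | [x] => simp [pvBbox]
    | x :: y :: rest =>
      rw [pvBbox]
      set L := x :: y :: rest with hL
      have hlen : 2 ≤ L.length := by simp [hL]
      have ht : (L.take (L.length / 2)).length = L.length / 2 := by
        simp [List.length_take]; omega
      have hd : (L.drop (L.length / 2)).length = L.length - L.length / 2 := by simp
      have htn : L.take (L.length / 2) ≠ [] := by
        intro h; rw [h] at ht; simp at ht; omega
      have hdn : L.drop (L.length / 2) ≠ [] := by
        intro h; rw [h] at hd; simp at hd; omega
      rw [← pvMerge_assoc]
      rw [ih (L.length / 2) (by omega) _ ht htn z]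
      rw [ih (L.length - L.length / 2) (by omega) _ hd hdn]
      rw [← List.foldl_append, List.take_append_drop]

-- A's update step is exactly "merge the accumulated box with this circle's box".
theorem stepA_eq_merge :
    (fun (s : Int × Int × Int × Int) (x : List Int) =>
      let minx := s.1; let miny := s.2.1; let maxx := s.2.2.1; let maxy := s.2.2.2
      let maxx := if x.getD 0 0 + x.getD 2 0 > maxx then x.getD 0 0 + x.getD 2 0 else maxx
      let minx := if x.getD 0 0 - x.getD 2 0 < minx then x.getD 0 0 - x.getD 2 0 else minx
      let maxy := if x.getD 1 0 + x.getD 2 0 > maxy then x.getD 1 0 + x.getD 2 0 else maxy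
      let miny := if x.getD 1 0 - x.getD 2 0 < miny then x.getD 1 0 - x.getD 2 0 else miny
      (minx, miny, maxx, maxy))
    = (fun s x => pvMerge s (pvBox x)) := by
  funext s x
  simp only [pvMerge, pvBox, min_def, max_def]
  refine Prod.ext ?_ (Prod.ext ?_ (Prod.ext ?_ ?_)) <;> simp <;> split_ifs <;> omega

-- ===== VERDICT (by name: the statement is the Claim_ definition above) =====
theorem bounding_rect_spec : Claim_equal_bounding_rect := by
  intro data _ _
  unfold Spec_bounding_rect bounding_rect
  rw [stepA_eq_merge]
  match data with
  | [] => rfl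
  | x :: xs =>
    rw [← pvBbox_foldl (x :: xs).length (x :: xs) rfl (by simp) (0, 0, 0, 0)]
    simp [bounding_rect_alt, pvMerge, min_comm, max_comm]
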